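-- pv_equiv track=rewrite | github.com/KuroyukiNear/Algorithms | Sorting_Algorithms/stalin.py | search_n_exterminate
-- ===== SOURCE A (Python) =====
-- def search_n_exterminate(arr):
--     i = 0
--     changed = False
--     while i < len(arr) - 1:
--         if arr[i] > arr[i + 1]:
--             del arr[i]
--             changed = True
--         else:
--             i += 1
--     return changed
-- ===== SOURCE B (Python) =====
-- def search_n_exterminate(arr):
--     # One O(n) pass: a deletion happens iff some adjacent pair is out of order.
--     # Note: unlike A, B does not mutate arr; the equivalence is about the return value.
--     return any(x > y for x, y in zip(arr, arr[1:]))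
-- ===== Notes on version B (the rewrite author's own statement) =====
-- stated objective: faster
-- what changed: Replaced the destructive while-loop with repeated O(n) del operations by a single non-mutating pass that checks whether any adjacent pair is out of order (the loop's return value is exactly that).
import Mathlib
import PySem

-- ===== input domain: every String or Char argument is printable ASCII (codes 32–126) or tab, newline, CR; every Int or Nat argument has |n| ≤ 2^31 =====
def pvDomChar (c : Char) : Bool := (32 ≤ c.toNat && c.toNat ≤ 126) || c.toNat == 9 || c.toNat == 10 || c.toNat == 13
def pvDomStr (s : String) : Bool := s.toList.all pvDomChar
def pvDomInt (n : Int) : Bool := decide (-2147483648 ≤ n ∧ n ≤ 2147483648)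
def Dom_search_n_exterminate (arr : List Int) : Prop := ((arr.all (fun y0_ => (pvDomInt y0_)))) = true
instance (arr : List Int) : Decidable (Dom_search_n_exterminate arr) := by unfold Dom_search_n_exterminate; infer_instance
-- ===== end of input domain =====

-- B replaces A's destructive O(n^2) delete loop by a single non-mutating adjacent-pair scan
-- returning the same Bool (A mutates arr in place; the equivalence proved is about the return value).


-- ===== PORT A =====
-- while i < len(arr) - 1: if arr[i] > arr[i+1]: del arr[i]; changed = True else: i += 1
-- (fuel = remaining loop-step bound, a pure totality device: each step deletes or advances,
--  so len(arr) - i ≤ fuel suffices; proved in loopA_eq below)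
def pvLoopA : Nat → List Int → Nat → Bool → Bool
  | 0, _, _, changed => changed
  | fuel + 1, arr, i, changed =>
    if h : i < arr.length - 1 then
      if arr[i]'(by omega) > arr[i+1]'(by omega) then
        pvLoopA fuel (arr.eraseIdx i) i true
      else
        pvLoopA fuel arr (i+1) changed
    else changed

def search_n_exterminate (arr : List Int) : Bool := pvLoopA arr.length arr 0 false

-- ===== PORT B =====
-- any(x > y for x, y in zip(arr, arr[1:]))  (arr[1:] = arr.drop 1, exact for this nonnegative slice)
def search_n_exterminate_alt (arr : List Int) : Bool :=
  (arr.zip (arr.drop 1)).any (fun p => decide (p.1 > p.2))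

-- ===== PRECONDITION & SPEC =====
def Spec_search_n_exterminate (arr : List Int) (out : Bool) : Prop := out = search_n_exterminate_alt arr
instance (arr : List Int) (out : Bool) : Decidable (Spec_search_n_exterminate arr out) := by unfold Spec_search_n_exterminate; infer_instance

-- ===== CLAIM (what is proved, stated in full; the proofs are below) =====
def Claim_equal_search_n_exterminate : Prop := ∀ (arr : List Int), Dom_search_n_exterminate arr → Spec_search_n_exterminate arr (search_n_exterminate arr)

-- ===== LEMMAS AND PROOFS =====

-- B's scan as a structural recursion over the list
def pvHasDesc : List Int → Bool
  | a :: b :: t => decide (a > b) || pvHasDesc (b :: t)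
  | _ => false

theorem alt_eq_hasDesc (arr : List Int) : search_n_exterminate_alt arr = pvHasDesc arr := by
  unfold search_n_exterminate_alt
  induction arr with
  | nil => simp [pvHasDesc]
  | cons a t ih =>
    cases t with
    | nil => simp [pvHasDesc]
    | cons b u =>
      simp only [List.drop_succ_cons, List.drop_zero, List.zip_cons_cons, List.any_cons]
      simp only [List.drop_succ_cons, List.drop_zero] at ih
      rw [ih]; rfl

theorem hasDesc_short (l : List Int) (h : l.length ≤ 1) : pvHasDesc l = false := by
  match l, h with
  | [], _ => rfl
  | [a], _ => rfl

theorem hasDesc_drop (arr : List Int) (i : Nat) (h : i + 1 < arr.length) :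
    pvHasDesc (arr.drop i) =
      (decide (arr[i]'(by omega) > arr[i+1]'(by omega)) || pvHasDesc (arr.drop (i+1))) := by
  rw [List.drop_eq_getElem_cons (by omega : i < arr.length),
      List.drop_eq_getElem_cons (h := h)]
  rfl

theorem loopA_eq (fuel : Nat) (arr : List Int) (i : Nat) (c : Bool)
    (hf : arr.length - i ≤ fuel) :
    pvLoopA fuel arr i c = (c || pvHasDesc (arr.drop i)) := by
  induction fuel generalizing arr i c with
  | zero =>
    simp only [pvLoopA]
    rw [hasDesc_short _ (by simp only [List.length_drop]; omega)]
    simp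
  | succ fuel ih =>
    simp only [pvLoopA]
    by_cases h : i < arr.length - 1
    · rw [dif_pos h]
      by_cases hgt : arr[i]'(by omega) > arr[i+1]'(by omega)
      · rw [if_pos hgt]
        rw [ih (arr.eraseIdx i) i true
            (by have := arr.length_eraseIdx_of_lt (i := i) (by omega); omega)]
        have : pvHasDesc (arr.drop i) = true := by
          rw [hasDesc_drop arr i (by omega)]; simp [hgt]
        simp [this]
      · rw [if_neg hgt]
        rw [ih arr (i+1) c (by omega)]
        rw [hasDesc_drop arr i (by omega)]
        simp [hgt]
    · rw [dif_neg h]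
      rw [hasDesc_short _ (by simp only [List.length_drop]; omega)]
      simp

-- ===== VERDICT (by name: the statement is the Claim_ definition above) =====
theorem search_n_exterminate_spec : Claim_equal_search_n_exterminate := by
  intro arr _
  unfold Spec_search_n_exterminate search_n_exterminate
  rw [loopA_eq _ _ _ _ (by omega), alt_eq_hasDesc]
  simp
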